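-- pv_equiv track=rewrite | github.com/MarcAtHTW/AbgeordnetenWatch | test_selenium.py | rebuild_topic
-- ===== SOURCE A (Python) =====
-- def rebuild_topic(topic, whitespaces_to_jump):
--     found_spaces = 0
--     new_topic = ''
--     for letter in str(topic):
--         if letter != ' ' and found_spaces < whitespaces_to_jump:
--             new_topic = new_topic + letter
--
--         elif letter == ' ' and found_spaces < whitespaces_to_jump:
--             new_topic = new_topic + letter
--             found_spaces = found_spaces + 1
--     return new_topic.strip()
-- ===== SOURCE B (Python) =====
-- def rebuild_topic(topic, whitespaces_to_jump):
--     if whitespaces_to_jump <= 0: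
--         return ''
--     s = str(topic)
--     return ' '.join(s.split(' ')[:whitespaces_to_jump]).strip()
-- ===== Notes on version B (the rewrite author's own statement) =====
-- stated objective: faster
-- what changed: Replaces the char-by-char accumulation loop with tokenize-slice-rejoin (split on ' ', take the first N fields, join, strip), guarding non-positive counts with an early ''.
import Mathlib
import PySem

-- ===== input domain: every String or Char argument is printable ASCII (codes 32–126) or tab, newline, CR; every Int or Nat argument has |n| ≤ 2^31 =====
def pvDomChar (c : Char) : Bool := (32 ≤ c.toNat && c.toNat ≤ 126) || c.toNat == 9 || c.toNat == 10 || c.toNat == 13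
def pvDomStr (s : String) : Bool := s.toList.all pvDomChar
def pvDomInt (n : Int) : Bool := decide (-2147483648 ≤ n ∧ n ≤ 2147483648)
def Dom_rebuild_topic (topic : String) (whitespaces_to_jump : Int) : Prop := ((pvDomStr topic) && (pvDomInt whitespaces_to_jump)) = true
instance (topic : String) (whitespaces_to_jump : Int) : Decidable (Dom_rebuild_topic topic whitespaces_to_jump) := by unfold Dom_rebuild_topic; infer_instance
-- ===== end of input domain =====

-- B replaces A's char-by-char accumulation loop with split-on-space / take N fields / rejoin / strip (measured faster; equal return values).

-- ===== PORT A =====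
-- literal port of A: fold over the characters with state (found_spaces, new_topic), then strip
def rebuild_topic (topic : String) (whitespaces_to_jump : Int) : String :=
  let r := topic.toList.foldl
    (fun (st : Int × List Char) letter =>
      if letter ≠ ' ' ∧ st.1 < whitespaces_to_jump then (st.1, st.2 ++ [letter])
      else if letter = ' ' ∧ st.1 < whitespaces_to_jump then (st.1 + 1, st.2 ++ [letter])
      else st)
    ((0 : Int), ([] : List Char))
  String.ofList (PySem.Chars.strip r.2)

-- ===== PORT B =====
-- literal port of Source B: guard w ≤ 0, else ' '.join(s.split(' ')[:w]).strip()
def rebuild_topic_alt (topic : String) (whitespaces_to_jump : Int) : String :=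
  if whitespaces_to_jump ≤ 0 then ""
  else
    String.ofList (PySem.Chars.strip (PySem.Chars.join [' ']
      (PySem.List.slice (PySem.Chars.splitOn topic.toList [' ']) none (some whitespaces_to_jump))))

-- ===== PRECONDITION & SPEC =====
def Spec_rebuild_topic (topic : String) (whitespaces_to_jump : Int) (out : String) : Prop := out = rebuild_topic_alt topic whitespaces_to_jump
instance (topic : String) (whitespaces_to_jump : Int) (out : String) : Decidable (Spec_rebuild_topic topic whitespaces_to_jump out) := by unfold Spec_rebuild_topic; infer_instance

-- ===== CLAIM (what is proved, stated in full; the proofs are below) =====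
def Claim_equal_rebuild_topic : Prop := ∀ (topic : String) (whitespaces_to_jump : Int), Dom_rebuild_topic topic whitespaces_to_jump → Spec_rebuild_topic topic whitespaces_to_jump (rebuild_topic topic whitespaces_to_jump)

-- ===== LEMMAS AND PROOFS =====

/-- Pure structural recursion computing `s.split(' ')`. -/
def pvS : List Char → List (List Char)
  | [] => [[]]
  | c :: cs => if c = ' ' then [] :: pvS cs else (pvS cs).modifyHead (c :: ·)

/-- A's loop, as a structural recursion producing the appended suffix. -/
def pvLoopA (w : Int) : List Char → Int → List Char
  | [], _ => []
  | c :: cs, fs =>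
    if c ≠ ' ' ∧ fs < w then c :: pvLoopA w cs fs
    else if c = ' ' ∧ fs < w then c :: pvLoopA w cs (fs + 1)
    else pvLoopA w cs fs

/-- A's loop with the remaining number of allowed spaces as a Nat. -/
def pvLoopN : List Char → Nat → List Char
  | _, 0 => []
  | [], _ + 1 => []
  | c :: cs, n + 1 => if c = ' ' then ' ' :: pvLoopN cs n else c :: pvLoopN cs (n + 1)

theorem pvGo_eq (fuel : Nat) : ∀ (l cur : List Char) (accs : List (List Char)),
    l.length ≤ fuel →
    PySem.Chars.splitOn.go [' '] fuel l cur accs = accs.reverse ++ (pvS l).modifyHead (cur.reverse ++ ·) := by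
  induction fuel with
  | zero =>
    intro l cur accs h
    have : l = [] := by cases l <;> simp_all
    subst this
    simp [PySem.Chars.splitOn.go, pvS, List.modifyHead]
  | succ fuel ih =>
    intro l cur accs h
    cases l with
    | nil => simp [PySem.Chars.splitOn.go, pvS, List.modifyHead]
    | cons c rest =>
      rw [PySem.Chars.splitOn.go.eq_def]
      by_cases hc : c = ' '
      · subst hc
        have := ih rest [] (List.reverse cur :: accs) (by simpa using h)
        simp [List.isPrefixOf, this, pvS]
        cases pvS rest <;> simp [List.modifyHead]
      · have := ih rest (c :: cur) accs (by simpa using h)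
        have hc' : ¬ (' ' = c) := fun h => hc h.symm
        simp [List.isPrefixOf, hc, hc', this, pvS]
        rfl

theorem pvSplitOn_eq (cs : List Char) : PySem.Chars.splitOn cs [' '] = pvS cs := by
  have := pvGo_eq (cs.length + 1) cs [] [] (by omega)
  simpa [PySem.Chars.splitOn] using this.trans (by cases pvS cs <;> simp [List.modifyHead])

theorem pvFoldl_eq (w : Int) : ∀ (cs : List Char) (fs : Int) (acc : List Char),
    (cs.foldl
      (fun (st : Int × List Char) letter =>
        if letter ≠ ' ' ∧ st.1 < w then (st.1, st.2 ++ [letter])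
        else if letter = ' ' ∧ st.1 < w then (st.1 + 1, st.2 ++ [letter])
        else st)
      (fs, acc)).2 = acc ++ pvLoopA w cs fs := by
  intro cs
  induction cs with
  | nil => intro fs acc; simp [pvLoopA]
  | cons c cs ih =>
    intro fs acc
    simp only [List.foldl_cons, pvLoopA]
    by_cases h1 : c ≠ ' ' ∧ fs < w
    · simp [h1, ih]
    · by_cases h2 : c = ' ' ∧ fs < w
      · simp [h2, ih]
      · simp [h1, h2, ih]

theorem pvLoopA_eq_loopN (w : Int) : ∀ (cs : List Char) (fs : Int),
    pvLoopA w cs fs = pvLoopN cs (w - fs).toNat := by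
  intro cs
  induction cs with
  | nil => intro fs; cases h : (w - fs).toNat <;> simp [pvLoopA, pvLoopN]
  | cons c cs ih =>
    intro fs
    by_cases hlt : fs < w
    · obtain ⟨n, hn⟩ : ∃ n, (w - fs).toNat = n + 1 := ⟨(w - fs).toNat - 1, by omega⟩
      by_cases hc : c = ' '
      · subst hc
        have : (w - (fs + 1)).toNat = n := by omega
        simp [pvLoopA, pvLoopN, hlt, hn, ih, this]
      · simp [pvLoopA, pvLoopN, hlt, hn, hc, ih]
    · have h0 : (w - fs).toNat = 0 := by omega
      simp [pvLoopA, pvLoopN, hlt, h0, ih]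

theorem pvS_ne_nil (cs : List Char) : pvS cs ≠ [] := by
  cases cs with
  | nil => simp [pvS]
  | cons c cs =>
    simp only [pvS]
    split
    · simp
    · cases h : pvS cs with
      | nil => exact absurd h (pvS_ne_nil cs)
      | cons a t => simp [List.modifyHead]

theorem pvJoin_cons (x : List Char) (t : List (List Char)) :
    PySem.Chars.join [' '] (x :: t) =
      x ++ (if t.isEmpty then [] else ' ' :: PySem.Chars.join [' '] t) := by
  cases t with
  | nil => simp [PySem.Chars.join, List.intercalate]
  | cons y t => simp [PySem.Chars.join, List.intercalate, List.intersperse]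

theorem pvMain (cs : List Char) (n : Nat) :
    pvLoopN cs (n + 1) =
      PySem.Chars.join [' '] ((pvS cs).take (n + 1)) ++
        (if n + 1 < (pvS cs).length then [' '] else []) := by
  induction cs generalizing n with
  | nil => simp [pvLoopN, pvS]
  | cons c cs ih =>
    by_cases hc : c = ' '
    · subst hc
      have hne := pvS_ne_nil cs
      have hS' : pvS (' ' :: cs) = [] :: pvS cs := by simp [pvS]
      have hL : ∀ k, pvLoopN (' ' :: cs) (k+1) = ' ' :: pvLoopN cs k := by
        intro k; simp [pvLoopN]
      cases n with
      | zero =>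
        have hpos : 0 < (pvS cs).length := List.length_pos_iff.mpr hne
        rw [hL, hS']
        simp [pvLoopN, hpos]
      | succ m =>
        have htne : ((pvS cs).take (m + 1)).isEmpty = false := by simp [hne]
        rw [hL, hS', ih m, List.take_succ_cons, pvJoin_cons, htne]
        simp
    · have hS : pvS (c :: cs) = (pvS cs).modifyHead (c :: ·) := by simp [pvS, hc]
      obtain ⟨h, t, hht⟩ : ∃ h t, pvS cs = h :: t := by
        cases hx : pvS cs with
        | nil => exact absurd hx (pvS_ne_nil cs)
        | cons h t => exact ⟨h, t, rfl⟩
      have htne : ((h :: t).take (n + 1)).isEmpty = false := by simp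
      simp only [pvLoopN, hc, hS, hht, List.modifyHead, List.take_succ_cons,
        pvJoin_cons, List.length_cons, ih]
      simp

theorem pvRstrip_append_space (x : List Char) :
    PySem.Chars.rstrip (x ++ [' ']) = PySem.Chars.rstrip x := by
  simp [PySem.Chars.rstrip, PySem.Chars.isspace]

theorem pvStrip_append_space (x : List Char) :
    PySem.Chars.strip (x ++ [' ']) = PySem.Chars.strip x := by
  simp only [PySem.Chars.strip, PySem.Chars.lstrip]
  by_cases h : List.dropWhile PySem.Chars.isspace x = []
  · rw [List.dropWhile_append, h]
    simp [PySem.Chars.rstrip, List.dropWhile, PySem.Chars.isspace]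
  · rw [List.dropWhile_append]
    simp only [List.isEmpty_iff, h, if_false]
    exact pvRstrip_append_space _

-- ===== VERDICT (by name: the statement is the Claim_ definition above) =====
theorem rebuild_topic_spec : Claim_equal_rebuild_topic := by
  intro topic w _
  have hA : rebuild_topic topic w
      = String.ofList (PySem.Chars.strip (pvLoopN topic.toList (w - 0).toNat)) := by
    have h := pvFoldl_eq w topic.toList 0 []
    simp only [List.nil_append, pvLoopA_eq_loopN] at h
    simp [rebuild_topic, h]
  unfold Spec_rebuild_topic rebuild_topic_alt
  rw [hA]
  by_cases hw : w ≤ 0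
  · have h0 : (w - 0).toNat = 0 := by omega
    rw [if_pos hw, h0]
    simp [pvLoopN, PySem.Chars.strip, PySem.Chars.lstrip, PySem.Chars.rstrip]
  · obtain ⟨n, hn⟩ : ∃ n, (w - 0).toNat = n + 1 := ⟨(w - 0).toNat - 1, by omega⟩
    rw [if_neg hw, PySem.List.slice_to, pvSplitOn_eq, hn,
      show w.toNat = n + 1 by omega, pvMain]
    · split
      · rw [pvStrip_append_space]
      · rw [List.append_nil]
    · omega
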